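-- pv_equiv track=rewrite | github.com/topherCantrell/farmer-cooks | src/game.py | find_command
-- ===== SOURCE A (Python) =====
-- def find_command(inp,commands):
--     matches = []
--     inp_words = inp.split(' ')
--     fewest_wilds = len(inp_words)
--     for target in commands:
--         target_words = target.split(' ')
--         if len(inp_words)!=len(target_words):
--             # Must be same the length
--             continue
--         match = True
--         num_wilds = 0
--         for i in range(len(inp_words)):
--             if target_words[i]=='*':
--                 # Matches everything
--                 num_wilds += 1
--                 continue
--             if inp_words[i] != target_words[i]:
--                 match = False
--                 break
--         if match:
--             matches.append((commands[target],num_wilds))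
--             if num_wilds<fewest_wilds:
--                 fewest_wilds = num_wilds
--
--     for i in range(len(matches)-1,-1,-1):
--         if matches[i][1]>fewest_wilds:
--             del matches[i]
--
--     if matches:
--         return matches[0][0]
--     else:
--         return None
-- ===== SOURCE B (Python) =====
-- def find_command(inp, commands):
--     inp_words = inp.split(' ')
--     best_wilds = len(inp_words) + 1
--     best_value = None
--     for target, value in commands.items():
--         target_words = target.split(' ')
--         if len(target_words) != len(inp_words):
--             continue
--         num_wilds = 0
--         match = True
--         for iw, tw in zip(inp_words, target_words):
--             if tw == '*':
--                 num_wilds += 1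
--             elif iw != tw:
--                 match = False
--                 break
--         if match and num_wilds < best_wilds:
--             best_wilds = num_wilds
--             best_value = value
--     return best_value
-- ===== Notes on version B (the rewrite author's own statement) =====
-- stated objective: simpler
-- what changed: Replaces A's collect-all-matches list, running-minimum bookkeeping, reverse-index deletion pass and matches[0] read with a single pass over the dict items that keeps one running best (strictly fewer wildcards wins, so the first command achieving the minimum is kept), and compares words with zip instead of indexing.
import Mathlib
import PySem

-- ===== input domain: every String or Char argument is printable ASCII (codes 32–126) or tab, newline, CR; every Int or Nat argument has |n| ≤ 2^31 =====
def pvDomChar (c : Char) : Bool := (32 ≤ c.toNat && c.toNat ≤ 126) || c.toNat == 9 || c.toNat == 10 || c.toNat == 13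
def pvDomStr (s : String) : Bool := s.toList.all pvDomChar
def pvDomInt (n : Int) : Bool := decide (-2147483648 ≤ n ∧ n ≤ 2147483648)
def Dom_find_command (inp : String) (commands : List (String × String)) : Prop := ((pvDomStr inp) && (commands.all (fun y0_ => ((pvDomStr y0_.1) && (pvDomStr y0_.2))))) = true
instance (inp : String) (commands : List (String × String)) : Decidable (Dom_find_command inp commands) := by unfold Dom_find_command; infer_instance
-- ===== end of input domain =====

-- B replaces A's collect-matches list, minimum bookkeeping and reverse-deletion cleanup pass
-- with a single running-best pass (strict '<' keeps the first command with fewest wildcards): simpler, O(1) extra space.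
-- Pre_ excludes command lists with duplicate keys: they cannot arise from the Python dict argument
-- (duplicates collapse at dict construction), so behaviour there is an artefact of the association-list encoding.


-- ===== PORT A =====
-- s.split(' '): the separator is non-empty, so PySem.Str.split? is always `some`; the default is never used
def pySplitSpace (s : String) : List String := (PySem.Str.split? s " ").getD []

-- A's inner `for i in range(len(inp_words))` loop with its break, walking both word lists in step
def pvMatchCount : List String → List String → Nat → Bool × Nat
  | [], _, n => (true, n)
  | _ :: _, [], n => (true, n)      -- unreachable: always called on equal-length lists
  | iw :: is, tw :: ts, n =>
    if tw = "*" then pvMatchCount is ts (n + 1)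
    else if iw ≠ tw then (false, n)
    else pvMatchCount is ts n

-- one iteration of A's first loop; `commands[target]` is the dict lookup (key present, so `.getD ""` is unreachable)
def pvStepA (iw : List String) (c0 : List (String × String)) (st : List (String × Nat) × Nat)
    (target : String × String) : List (String × Nat) × Nat :=
  let targetWords := pySplitSpace target.1
  if iw.length ≠ targetWords.length then st
  else
    let r := pvMatchCount iw targetWords 0
    if r.1 then
      (st.1 ++ [((List.lookup target.1 c0).getD "", r.2)],
       if r.2 < st.2 then r.2 else st.2)
    else st

-- one iteration of A's cleanup loop: `if matches[i][1] > fewest: del matches[i]` (index always in range, default unreachable)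
def pvDelStep (fewest : Nat) (ms : List (String × Nat)) (i : Int) : List (String × Nat) :=
  if (PySem.List.pyGetD ms i ("", 0)).2 > fewest then ms.eraseIdx i.toNat else ms

def find_command (inp : String) (commands : List (String × String)) : Option String :=
  let inpWords := pySplitSpace inp
  let st := commands.foldl (pvStepA inpWords commands) ([], inpWords.length)
  let matches_ := (PySem.List.pyRange ((st.1.length : Int) - 1) (-1) (-1)).foldl (pvDelStep st.2) st.1
  match matches_ with
  | [] => none
  | m :: _ => some m.1

-- ===== PORT B =====
-- B's inner loop over zip(inp_words, target_words) with its break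
def pvWildScan : List (String × String) → Nat → Bool × Nat
  | [], n => (true, n)
  | (iw, tw) :: rest, n =>
    if tw = "*" then pvWildScan rest (n + 1)
    else if iw ≠ tw then (false, n)
    else pvWildScan rest n

-- one iteration of B's single pass, maintaining the running best (best_wilds, best_value)
def pvStepB (iw : List String) (best : Nat × Option String) (p : String × String) : Nat × Option String :=
  let targetWords := pySplitSpace p.1
  if targetWords.length ≠ iw.length then best
  else
    let r := pvWildScan (iw.zip targetWords) 0
    if r.1 ∧ r.2 < best.1 then (r.2, some p.2) else best

def find_command_alt (inp : String) (commands : List (String × String)) : Option String :=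
  let inpWords := pySplitSpace inp
  (commands.foldl (pvStepB inpWords) (inpWords.length + 1, none)).2

-- ===== PRECONDITION & SPEC =====
-- Pre_ excludes command lists with duplicate keys: they cannot arise from the Python dict argument
-- (duplicates collapse when the dict is built), so behaviour there is an artefact of the association-list encoding.
def Pre_find_command (inp : String) (commands : List (String × String)) : Prop :=
  (commands.map Prod.fst).Nodup

instance (inp : String) (commands : List (String × String)) : Decidable (Pre_find_command inp commands) := by
  unfold Pre_find_command; infer_instance

def pvWitness_find_command : String × (List (String × String)) :=
  ("feed the cow", [("feed the *", "You feed it."), ("* the cow", "Moo.")])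

def Spec_find_command (inp : String) (commands : List (String × String)) (out : Option String) : Prop :=
  out = find_command_alt inp commands

instance (inp : String) (commands : List (String × String)) (out : Option String) : Decidable (Spec_find_command inp commands out) := by
  unfold Spec_find_command; infer_instance

-- ===== CLAIM (what is proved, stated in full; the proofs are below) =====
def Claim_equal_find_command : Prop := ∀ (inp : String) (commands : List (String × String)), Dom_find_command inp commands → Pre_find_command inp commands → Spec_find_command inp commands (find_command inp commands)

-- ===== LEMMAS AND PROOFS =====

-- the list of (value, num_wilds) of the commands that match, in order (A's `matches` list)
def msOf (iw : List String) (c0 : List (String × String)) : List (String × String) → List (String × Nat)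
  | [] => []
  | p :: cs =>
    let tw := pySplitSpace p.1
    if iw.length ≠ tw.length then msOf iw c0 cs
    else if (pvMatchCount iw tw 0).1 then
      ((List.lookup p.1 c0).getD "", (pvMatchCount iw tw 0).2) :: msOf iw c0 cs
    else msOf iw c0 cs

-- A's running `fewest_wilds` over a matches list
def fmin (f : Nat) : List (String × Nat) → Nat
  | [] => f
  | m :: ms => fmin (if m.2 < f then m.2 else f) ms

-- B's running best over a matches list
def fbest (b : Nat × Option String) : List (String × Nat) → Nat × Option String
  | [] => b
  | m :: ms => fbest (if m.2 < b.1 then (m.2, some m.1) else b) ms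

theorem matchCount_snd_le (iw : List String) : ∀ (tw : List String) (n : Nat),
    (pvMatchCount iw tw n).2 ≤ n + iw.length := by
  induction iw with
  | nil => intro tw n; cases tw <;> simp [pvMatchCount]
  | cons x xs ih =>
    intro tw n
    cases tw with
    | nil => simp [pvMatchCount]
    | cons t ts =>
      simp only [pvMatchCount]
      split_ifs with h1 h2
      · have := ih ts (n + 1); simp at this ⊢; omega
      · simp
      · have := ih ts n; simp at this ⊢; omega

theorem wildScan_eq_matchCount : ∀ (iw tw : List String) (n : Nat), iw.length = tw.length →
    pvWildScan (iw.zip tw) n = pvMatchCount iw tw n := by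
  intro iw
  induction iw with
  | nil => intro tw n h; cases tw <;> simp_all [pvWildScan, pvMatchCount]
  | cons x xs ih =>
    intro tw n h
    cases tw with
    | nil => simp at h
    | cons t ts =>
      simp only [List.zip_cons_cons, pvWildScan, pvMatchCount]
      have hl : xs.length = ts.length := by simpa using h
      split_ifs <;> simp [ih ts _ hl]

theorem loopA_eq (iw : List String) (c0 : List (String × String)) :
    ∀ (cs : List (String × String)) (acc : List (String × Nat)) (f : Nat),
    cs.foldl (pvStepA iw c0) (acc, f) = (acc ++ msOf iw c0 cs, fmin f (msOf iw c0 cs)) := by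
  intro cs
  induction cs with
  | nil => intro acc f; simp [msOf, fmin]
  | cons p cs ih =>
    intro acc f
    simp only [List.foldl_cons, msOf]
    by_cases hl : iw.length ≠ (pySplitSpace p.1).length
    · rw [show pvStepA iw c0 (acc, f) p = (acc, f) by simp [pvStepA, hl], ih, if_pos hl]
    · rw [if_neg hl]
      by_cases hm : (pvMatchCount iw (pySplitSpace p.1) 0).1
      · rw [show pvStepA iw c0 (acc, f) p =
            (acc ++ [((List.lookup p.1 c0).getD "", (pvMatchCount iw (pySplitSpace p.1) 0).2)],
             if (pvMatchCount iw (pySplitSpace p.1) 0).2 < f then (pvMatchCount iw (pySplitSpace p.1) 0).2 else f) by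
              simp [pvStepA, hl, hm], ih, if_pos hm]
        simp [fmin]
      · rw [show pvStepA iw c0 (acc, f) p = (acc, f) by simp [pvStepA, hl, hm], ih, if_neg hm]

theorem loopB_eq (iw : List String) (c0 : List (String × String)) :
    ∀ (cs : List (String × String)) (b : Nat × Option String),
    (∀ p ∈ cs, List.lookup p.1 c0 = some p.2) →
    cs.foldl (pvStepB iw) b = fbest b (msOf iw c0 cs) := by
  intro cs
  induction cs with
  | nil => intro b _; simp [msOf, fbest]
  | cons p cs ih =>
    intro b h
    have hp : List.lookup p.1 c0 = some p.2 := h p (by simp)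
    have hcs : ∀ q ∈ cs, List.lookup q.1 c0 = some q.2 := fun q hq => h q (by simp [hq])
    simp only [List.foldl_cons, msOf]
    by_cases hl : iw.length ≠ (pySplitSpace p.1).length
    · have hl' : (pySplitSpace p.1).length ≠ iw.length := fun e => hl e.symm
      rw [show pvStepB iw b p = b by simp [pvStepB, hl'], ih b hcs, if_pos hl]
    · rw [if_neg hl]
      have hl' : ¬ (pySplitSpace p.1).length ≠ iw.length := fun e => hl (fun e' => e e'.symm)
      have hlen : iw.length = (pySplitSpace p.1).length := by omega
      have hz := wildScan_eq_matchCount iw (pySplitSpace p.1) 0 hlen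
      by_cases hm : (pvMatchCount iw (pySplitSpace p.1) 0).1
      · rw [if_pos hm]
        rw [show pvStepB iw b p =
            (if (pvMatchCount iw (pySplitSpace p.1) 0).2 < b.1 then
              ((pvMatchCount iw (pySplitSpace p.1) 0).2, some p.2) else b) by
              simp [pvStepB, hl', hz, hm]]
        rw [ih _ hcs]
        simp only [fbest, hp, Option.getD_some]
      · rw [if_neg hm, show pvStepB iw b p = b by simp [pvStepB, hl', hz, hm], ih b hcs]

theorem delLoop_eq_filter (f : Nat) : ∀ (k : Nat) (ms : List (String × Nat)), k ≤ ms.length →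
    (PySem.List.pyRange ((k : Int) - 1) (-1) (-1)).foldl (pvDelStep f) ms =
      (ms.take k).filter (fun m => decide (m.2 ≤ f)) ++ ms.drop k := by
  intro k
  induction k with
  | zero => intro ms _; simp [PySem.List.pyRange_neg_one_eq_nil]
  | succ k ih =>
    intro ms hk
    have hklt : k < ms.length := by omega
    have hcons : PySem.List.pyRange ((k : Int) + 1 - 1) (-1) (-1) =
        ((k : Int)) :: PySem.List.pyRange ((k : Int) - 1) (-1) (-1) := by
      rw [show ((k : Int) + 1 - 1) = (k : Int) by ring]
      exact PySem.List.pyRange_neg_one_cons (by omega)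
    rw [show ((k + 1 : Nat) : Int) - 1 = (k : Int) + 1 - 1 by push_cast; ring, hcons,
        List.foldl_cons]
    have hget : PySem.List.pyGetD ms ((k : Int)) ("", 0) = ms[k] :=
      PySem.List.pyGetD_ofNat ms k ("", 0) hklt
    have htake : ms.take (k + 1) = ms.take k ++ [ms[k]] := by
      rw [List.take_add_one, List.getElem?_eq_getElem hklt]; rfl
    by_cases hdel : ms[k].2 > f
    · have hstep : pvDelStep f ms ((k : Int)) = ms.eraseIdx k := by
        simp [pvDelStep, hget, hdel]
      rw [hstep, ih (ms.eraseIdx k) (by rw [List.length_eraseIdx_of_lt hklt]; omega)]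
      rw [List.eraseIdx_eq_take_drop_succ]
      have h1 : (ms.take k ++ ms.drop (k + 1)).take k = ms.take k := by
        rw [List.take_append_of_le_length (by simp [List.length_take]; omega)]
        simp
      have h2 : (ms.take k ++ ms.drop (k + 1)).drop k = ms.drop (k + 1) := by
        rw [List.drop_append_of_le_length (by simp [List.length_take]; omega)]
        simp
      rw [h1, h2, htake, List.filter_append,
          show (List.filter (fun m => decide (m.2 ≤ f)) [ms[k]]) = [] by simp; omega,
          List.append_nil]
    · have hstep : pvDelStep f ms ((k : Int)) = ms := by
        simp [pvDelStep, hget]; omega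
      rw [hstep, ih ms (by omega), htake, List.filter_append,
          show (List.filter (fun m => decide (m.2 ≤ f)) [ms[k]]) = [ms[k]] by simp; omega,
          List.drop_eq_getElem_cons hklt, List.append_assoc, List.singleton_append]

theorem fmin_le (ms : List (String × Nat)) : ∀ (f : Nat), fmin f ms ≤ f := by
  induction ms with
  | nil => intro f; simp [fmin]
  | cons m ms ih =>
    intro f
    simp only [fmin]
    calc fmin (if m.2 < f then m.2 else f) ms ≤ _ := ih _
      _ ≤ f := by split_ifs <;> omega

theorem fmin_le_mem (ms : List (String × Nat)) : ∀ (f : Nat) (m : String × Nat), m ∈ ms → fmin f ms ≤ m.2 := by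
  induction ms with
  | nil => intro f m hm; simp at hm
  | cons x ms ih =>
    intro f m hm
    simp only [fmin]
    rcases List.mem_cons.mp hm with h | h
    · subst h
      calc fmin (if m.2 < f then m.2 else f) ms ≤ _ := fmin_le ms _
        _ ≤ m.2 := by split_ifs <;> omega
    · exact ih _ m h

theorem fbest_snd (ms : List (String × Nat)) : ∀ (w : Nat) (v : Option String),
    (fbest (w, v) ms).2 =
      if fmin w ms < w then (ms.find? (fun m => decide (m.2 = fmin w ms))).map Prod.fst else v := by
  induction ms with
  | nil => intro w v; simp [fbest, fmin]
  | cons m ms ih =>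
    intro w v
    simp only [fbest, fmin]
    by_cases h : m.2 < w
    · simp only [if_pos h, ih]
      have hle : fmin m.2 ms ≤ m.2 := fmin_le ms m.2
      by_cases he : m.2 = fmin m.2 ms
      · rw [if_neg (by omega), if_pos (by omega), List.find?_cons_of_pos (by simp [he.symm])]
        simp
      · have hlt : fmin m.2 ms < m.2 := by omega
        rw [if_pos hlt, if_pos (by omega), List.find?_cons_of_neg (by simp; omega)]
    · simp only [if_neg h, ih]
      by_cases hlt : fmin w ms < w
      · have hle : fmin w ms ≤ w := le_of_lt hlt
        rw [if_pos hlt, if_pos hlt, List.find?_cons_of_neg (by simp; omega)]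
      · rw [if_neg hlt, if_neg hlt]

theorem fmin_shift (ms : List (String × Nat)) (L : Nat) (hne : ms ≠ [])
    (hle : ∀ m ∈ ms, m.2 ≤ L) : fmin (L + 1) ms = fmin L ms := by
  cases ms with
  | nil => exact absurd rfl hne
  | cons m ms =>
    have hm : m.2 ≤ L := hle m (by simp)
    simp only [fmin]
    congr 1
    have h1 : (if m.2 < L + 1 then m.2 else L + 1) = m.2 := by split_ifs <;> omega
    have h2 : (if m.2 < L then m.2 else L) = m.2 := by split_ifs <;> omega
    rw [h1, h2]

theorem find?_le_eq_find?_eq (F : Nat) : ∀ (ms : List (String × Nat)), (∀ m ∈ ms, F ≤ m.2) →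
    ms.find? (fun m => decide (m.2 ≤ F)) = ms.find? (fun m => decide (m.2 = F)) := by
  intro ms
  induction ms with
  | nil => intro _; rfl
  | cons m ms ih =>
    intro h
    have hm : F ≤ m.2 := h m (by simp)
    by_cases he : m.2 = F
    · rw [List.find?_cons_of_pos (by simp [he]), List.find?_cons_of_pos (by simp [he])]
    · rw [List.find?_cons_of_neg (by simp; omega), List.find?_cons_of_neg (by simp [he])]
      exact ih (fun q hq => h q (by simp [hq]))

theorem msOf_snd_le (iw : List String) (c0 : List (String × String)) :
    ∀ (cs : List (String × String)) (m : String × Nat), m ∈ msOf iw c0 cs → m.2 ≤ iw.length := by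
  intro cs
  induction cs with
  | nil => intro m hm; simp [msOf] at hm
  | cons p cs ih =>
    intro m hm
    simp only [msOf] at hm
    split_ifs at hm with h1 h2
    · exact ih m hm
    · rcases List.mem_cons.mp hm with h | h
      · subst h
        simpa using matchCount_snd_le iw (pySplitSpace p.1) 0
      · exact ih m h
    · exact ih m hm

theorem lookup_of_nodup : ∀ (l : List (String × String)) (p : String × String),
    (l.map Prod.fst).Nodup → p ∈ l → List.lookup p.1 l = some p.2 := by
  intro l
  induction l with
  | nil => intro p _ hp; simp at hp
  | cons q l ih =>
    intro p hnd hp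
    have hnd' : (l.map Prod.fst).Nodup := (List.nodup_cons.mp (by simpa using hnd)).2
    rcases List.mem_cons.mp hp with h | h
    · subst h; simp [List.lookup]
    · have hq : q.1 ∉ l.map Prod.fst := (List.nodup_cons.mp (by simpa using hnd)).1
      have hne : (p.1 == q.1) = false := by
        simp only [beq_eq_false_iff_ne, ne_eq]
        intro e
        exact hq (e ▸ List.mem_map_of_mem h)
      simp only [List.lookup, hne]
      exact ih p hnd' h

theorem match_head_eq (xs : List (String × Nat)) :
    (match xs with | [] => none | m :: _ => some m.1) = xs.head?.map Prod.fst := by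
  cases xs <;> rfl

-- ===== VERDICT (by name: the statement is the Claim_ definition above) =====
theorem find_command_spec : Claim_equal_find_command := by
  intro inp commands _ hpre
  unfold Spec_find_command
  unfold find_command find_command_alt
  simp only []
  set iw := pySplitSpace inp with hiw
  set L := iw.length with hL
  have hlk : ∀ p ∈ commands, List.lookup p.1 commands = some p.2 :=
    fun p hp => lookup_of_nodup commands p hpre hp
  set ms := msOf iw commands commands with hms
  have hA : commands.foldl (pvStepA iw commands) ([], L) = (ms, fmin L ms) := by
    rw [loopA_eq iw commands commands [] L]; simp only [List.nil_append, ← hms]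
  rw [hA]
  have hB : commands.foldl (pvStepB iw) (L + 1, none) = fbest (L + 1, none) ms :=
    loopB_eq iw commands commands (L + 1, none) hlk
  rw [hB]
  have hdel := delLoop_eq_filter (fmin L ms) ms.length ms (le_refl _)
  simp only at hdel
  rw [hdel, List.take_length, List.drop_length, List.append_nil, match_head_eq,
      List.head?_filter]
  rw [fbest_snd ms (L + 1) none]
  cases hcase : ms with
  | nil => simp [fmin]
  | cons m0 mrest =>
    have hne : ms ≠ [] := by rw [hcase]; simp
    have hle : ∀ m ∈ ms, m.2 ≤ L := fun m hm => msOf_snd_le iw commands commands m (hms ▸ hm)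
    rw [← hcase]
    have hshift : fmin (L + 1) ms = fmin L ms := fmin_shift ms L hne hle
    have hm0 : m0 ∈ ms := by rw [hcase]; simp
    have hFle : fmin L ms ≤ L := le_trans (fmin_le_mem ms L m0 hm0) (hle m0 hm0)
    rw [hshift, if_pos (by omega)]
    rw [find?_le_eq_find?_eq (fmin L ms) ms (fun m hm => fmin_le_mem ms L m hm)]
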